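-- pv_equiv track=rewrite | github.com/arnavvadlapatla/Clairvyn-UI | src/app/core/assemble.py | interval_subtract
-- ===== SOURCE A (Python) =====
-- def interval_subtract(base, cuts): # returns list of remaining(start, end)
--     cuts = sorted(cuts)
--     result = []
--     cur = base[0]
--     for s, e in cuts:
--         if e <= cur:
--             continue
--         if s > cur:
--             result.append((cur, min(s, base[1])))
--         cur = max(cur, e)
--         if cur >= base[1]:
--             break
--     if cur < base[1]:
--         result.append((cur, base[1]))
--
--     return result
-- ===== SOURCE B (Python) =====
-- def interval_subtract(base, cuts):  # returns list of remaining (start, end)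
--     b0, b1 = base
--     # phase 1: clip each cut to the base, drop degenerate pieces, and fold the
--     # sorted pieces into a table of maximal disjoint covered intervals
--     clipped = [(max(s, b0), min(e, b1)) for s, e in sorted(cuts)]
--     clipped = [(s, e) for s, e in clipped if s <= e]
--     covered = []
--     for s, e in clipped:
--         if covered and s <= covered[-1][1]:
--             covered[-1] = (covered[-1][0], max(covered[-1][1], e))
--         else:
--             covered.append((s, e))
--     # phase 2: complement of the covered table within the base
--     out = []
--     cur = b0
--     for s, e in covered:
--         if s > cur:
--             out.append((cur, s))
--         cur = max(cur, e)
--     if cur < b1: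
--         out.append((cur, b1))
--     return out
-- ===== Notes on version B (the rewrite author's own statement) =====
-- stated objective: alternative
-- what changed: A is a single sweep over the sorted raw cuts with on-the-fly clamping (min/max against the base) and an early break; B is a three-phase pipeline: clip every cut to the base and drop degenerate pieces, fold the sorted pieces into a table of maximal disjoint covered intervals, then take the complement of that table inside the base in a separate pass.
-- intended difference: On an empty-or-inverted base (base[0] >= base[1]) whose cuts all reach above base[0] only with starts above base[0] and at least one such cut exists, A returns the degenerate interval [(base[0], base[1])] (e.g. [(5, 3)]) left over from its sweep, while B returns []; nothing remains of an empty base, so [] is the intended value. — e.g. on interval_subtract((5, 3), [(6, 7)]): A returns [(5, 3)], B returns []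
-- outside the precondition, e.g. on interval_subtract((0, 10), [(5, 2)]): A returns [(0, 5), (2, 10)], B returns [(0, 10)]
import Mathlib
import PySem

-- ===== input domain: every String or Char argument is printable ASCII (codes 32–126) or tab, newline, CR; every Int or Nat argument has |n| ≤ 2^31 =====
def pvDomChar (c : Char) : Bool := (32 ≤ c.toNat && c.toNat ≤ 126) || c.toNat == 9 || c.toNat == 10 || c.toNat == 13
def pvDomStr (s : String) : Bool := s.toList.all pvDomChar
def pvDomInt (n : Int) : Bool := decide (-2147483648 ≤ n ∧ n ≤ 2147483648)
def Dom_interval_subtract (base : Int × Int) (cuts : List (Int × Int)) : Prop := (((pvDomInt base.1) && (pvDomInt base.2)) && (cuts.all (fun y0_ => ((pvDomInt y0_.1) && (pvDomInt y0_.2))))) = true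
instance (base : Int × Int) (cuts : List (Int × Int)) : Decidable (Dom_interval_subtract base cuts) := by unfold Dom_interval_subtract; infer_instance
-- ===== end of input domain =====

-- B replaces A's single clamping sweep (with break) by a clip/merge-coverage-table/complement pipeline; objective: alternative decomposition, same cost.

-- ===== PORT A =====
-- the for-loop of A: state (result, cur), early 'break' = early return of the state
def pvAGo (b1 : Int) : List (Int × Int) → List (Int × Int) → Int → List (Int × Int) × Int
  | [], res, cur => (res, cur)
  | (s, e) :: rest, res, cur =>
    if e ≤ cur then pvAGo b1 rest res cur
    else
      let res' := if cur < s then res ++ [(cur, min s b1)] else res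
      let cur' := max cur e
      if b1 ≤ cur' then (res', cur') else pvAGo b1 rest res' cur'

def interval_subtract (base : Int × Int) (cuts : List (Int × Int)) : List (Int × Int) :=
  let sc := PySem.List.sorted2 cuts Prod.fst Prod.snd
  let rc := pvAGo base.2 sc [] base.1
  if rc.2 < base.2 then rc.1 ++ [(rc.2, base.2)] else rc.1

-- ===== PORT B =====
-- one step of B's coverage-merging loop: extend covered[-1] or append
def pvMergeStep (acc : List (Int × Int)) (c : Int × Int) : List (Int × Int) :=
  match acc.getLast? with
  | none => acc ++ [c]
  | some last => if c.1 ≤ last.2 then acc.dropLast ++ [(last.1, max last.2 c.2)] else acc ++ [c]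

def interval_subtract_alt (base : Int × Int) (cuts : List (Int × Int)) : List (Int × Int) :=
  let b0 := base.1
  let b1 := base.2
  let clipped := ((PySem.List.sorted2 cuts Prod.fst Prod.snd).map
      (fun c => (max c.1 b0, min c.2 b1))).filter (fun c => decide (c.1 ≤ c.2))
  let covered := clipped.foldl pvMergeStep []
  let oc := covered.foldl (fun (p : List (Int × Int) × Int) c =>
      (if p.2 < c.1 then p.1 ++ [(p.2, c.1)] else p.1, max p.2 c.2)) ([], b0)
  if oc.2 < b1 then oc.1 ++ [(oc.2, b1)] else oc.1

-- ===== PRECONDITION & SPEC =====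
-- Pre_ excludes only malformed inverted cuts (start > end) that are live inside the base
-- (base.1 < end < base.2): on those A emits overlapping result pieces — an artefact of its
-- sweep treating end as coverage but start as the gap boundary — which B's clipping drops;
-- inverted cuts that are dead (end ≤ base.1) or reach past the base end (end ≥ base.2) are kept.
def Pre_interval_subtract (base : Int × Int) (cuts : List (Int × Int)) : Prop :=
  ∀ c ∈ cuts, c.1 ≤ c.2 ∨ c.2 ≤ base.1 ∨ base.2 ≤ c.2

instance (base : Int × Int) (cuts : List (Int × Int)) : Decidable (Pre_interval_subtract base cuts) := by
  unfold Pre_interval_subtract; infer_instance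

def pvWitness_interval_subtract : (Int × Int) × (List (Int × Int)) := ((0, 10), [(2, 4), (7, 9)])

-- On an empty-or-inverted base (base.1 ≥ base.2) with at least one cut ending above base.1 and
-- every such cut also starting above base.1, A returns the degenerate leftover [(base.1, base.2)]
-- while B returns []; nothing remains of an empty base, so [] is the intended value.
def D_interval_subtract (base : Int × Int) (cuts : List (Int × Int)) : Prop :=
  base.2 ≤ base.1 ∧ (∃ c ∈ cuts, base.1 < c.2) ∧ (∀ c ∈ cuts, base.1 < c.2 → base.1 < c.1)

instance (base : Int × Int) (cuts : List (Int × Int)) : Decidable (D_interval_subtract base cuts) := by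
  unfold D_interval_subtract; infer_instance

def Spec_interval_subtract (base : Int × Int) (cuts : List (Int × Int)) (out : List (Int × Int)) : Prop :=
  ¬ D_interval_subtract base cuts → out = interval_subtract_alt base cuts

instance (base : Int × Int) (cuts : List (Int × Int)) (out : List (Int × Int)) : Decidable (Spec_interval_subtract base cuts out) := by
  unfold Spec_interval_subtract; infer_instance

def pvDiffWitness_interval_subtract : (Int × Int) × (List (Int × Int)) := ((5, 3), [(6, 7)])
def pvDiffWitnessOut_interval_subtract : (List (Int × Int)) × (List (Int × Int)) := ([(5, 3)], [])

-- ===== CLAIM (what is proved, stated in full; the proofs are below) =====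
def Claim_unchanged_interval_subtract : Prop := ∀ (base : Int × Int) (cuts : List (Int × Int)), Dom_interval_subtract base cuts → Pre_interval_subtract base cuts → Spec_interval_subtract base cuts (interval_subtract base cuts)
def Claim_changed_interval_subtract : Prop := Dom_interval_subtract (pvDiffWitness_interval_subtract.1) (pvDiffWitness_interval_subtract.2) ∧ Pre_interval_subtract (pvDiffWitness_interval_subtract.1) (pvDiffWitness_interval_subtract.2) ∧ D_interval_subtract (pvDiffWitness_interval_subtract.1) (pvDiffWitness_interval_subtract.2) ∧ interval_subtract (pvDiffWitness_interval_subtract.1) (pvDiffWitness_interval_subtract.2) = pvDiffWitnessOut_interval_subtract.1 ∧ interval_subtract_alt (pvDiffWitness_interval_subtract.1) (pvDiffWitness_interval_subtract.2) = pvDiffWitnessOut_interval_subtract.2 ∧ pvDiffWitnessOut_interval_subtract.1 ≠ pvDiffWitnessOut_interval_subtract.2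
def Claim_exact_interval_subtract : Prop := ∀ (base : Int × Int) (cuts : List (Int × Int)), Dom_interval_subtract base cuts → Pre_interval_subtract base cuts → D_interval_subtract base cuts → interval_subtract base cuts ≠ interval_subtract_alt base cuts

-- ===== LEMMAS AND PROOFS =====

-- the lexicographic 'before' relation used by Python's sorted on pairs
def pvLexBf (a b : Int × Int) : Bool := decide (a.1 < b.1) || (!decide (b.1 < a.1) && decide (a.2 < b.2))

theorem pv_insertBy_nil {α : Type} (bf : α → α → Bool) (x : α) :
    PySem.List.insertBy bf x [] = [x] := rfl

theorem pv_insertBy_cons {α : Type} (bf : α → α → Bool) (x y : α) (ys : List α) :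
    PySem.List.insertBy bf x (y :: ys) =
      if bf x y then x :: y :: ys else y :: PySem.List.insertBy bf x ys := rfl

theorem pv_pairwise_insertBy {α : Type} (bf : α → α → Bool)
    (hasym : ∀ a b, bf a b = true → bf b a = false)
    (hcmp : ∀ a b c, bf a b = true → bf c b = false → bf c a = false)
    (x : α) (ys : List α) (h : ys.Pairwise (fun a b => bf b a = false)) :
    (PySem.List.insertBy bf x ys).Pairwise (fun a b => bf b a = false) := by
  induction ys with
  | nil => simp [pv_insertBy_nil]
  | cons y ys ih =>
    rcases List.pairwise_cons.mp h with ⟨hy, hys⟩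
    rw [pv_insertBy_cons]
    by_cases hxy : bf x y = true
    · rw [if_pos hxy]
      refine List.pairwise_cons.mpr ⟨?_, h⟩
      intro z hz
      rcases List.mem_cons.mp hz with hz | hz
      · rw [hz]; exact hasym x y hxy
      · exact hcmp x y z hxy (hy z hz)
    · rw [if_neg hxy]
      refine List.pairwise_cons.mpr ⟨?_, ih hys⟩
      intro z hz
      rcases (PySem.List.mem_insertBy bf x z ys).mp hz with hz | hz
      · subst hz; exact Bool.eq_false_iff.mpr hxy
      · exact hy z hz

theorem pv_foldl_insertBy_pairwise {α : Type} (bf : α → α → Bool)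
    (hasym : ∀ a b, bf a b = true → bf b a = false)
    (hcmp : ∀ a b c, bf a b = true → bf c b = false → bf c a = false)
    (xs : List α) :
    ∀ acc : List α, acc.Pairwise (fun a b => bf b a = false) →
      (xs.foldl (fun acc x => PySem.List.insertBy bf x acc) acc).Pairwise (fun a b => bf b a = false) := by
  induction xs with
  | nil => intro acc h; simpa using h
  | cons x xs ih =>
    intro acc h
    exact ih _ (pv_pairwise_insertBy bf hasym hcmp x acc h)

theorem pv_sorted2_eq (xs : List (Int × Int)) :
    PySem.List.sorted2 xs Prod.fst Prod.snd =
      xs.foldl (fun acc x => PySem.List.insertBy pvLexBf x acc) [] := rfl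

theorem pv_sorted2_pairwise_fst (xs : List (Int × Int)) :
    (PySem.List.sorted2 xs Prod.fst Prod.snd).Pairwise (fun a b => a.1 ≤ b.1) := by
  rw [pv_sorted2_eq]
  have h := pv_foldl_insertBy_pairwise pvLexBf
    (by intro a b hab; simp [pvLexBf] at hab ⊢; omega)
    (by intro a b c hab hcb; simp [pvLexBf] at hab hcb ⊢; omega)
    xs [] (by simp)
  refine h.imp ?_
  intro a b hba
  simp [pvLexBf] at hba
  omega

theorem pv_mem_sorted2 (xs : List (Int × Int)) (c : Int × Int) :
    c ∈ PySem.List.sorted2 xs Prod.fst Prod.snd ↔ c ∈ xs :=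
  (PySem.List.sorted2_perm xs Prod.fst Prod.snd false).mem_iff

-- A's loop as a pure recursion (result built in front)
def pvARun (b1 : Int) : List (Int × Int) → Int → List (Int × Int)
  | [], cur => if cur < b1 then [(cur, b1)] else []
  | (s, e) :: r, cur =>
    if e ≤ cur then pvARun b1 r cur
    else
      (if cur < s then [(cur, min s b1)] else []) ++
        (if b1 ≤ max cur e then [] else pvARun b1 r (max cur e))

theorem pvAGo_run (b1 : Int) (l : List (Int × Int)) :
    ∀ (res : List (Int × Int)) (cur : Int),
      (if (pvAGo b1 l res cur).2 < b1 then (pvAGo b1 l res cur).1 ++ [((pvAGo b1 l res cur).2, b1)]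
        else (pvAGo b1 l res cur).1) = res ++ pvARun b1 l cur := by
  induction l with
  | nil => intro res cur; simp only [pvAGo, pvARun]; split_ifs <;> simp
  | cons c r ih =>
    intro res cur
    obtain ⟨s, e⟩ := c
    by_cases he : e ≤ cur
    · simp only [pvAGo, pvARun, if_pos he]
      exact ih res cur
    · by_cases hb : b1 ≤ max cur e
      · simp only [pvAGo, pvARun, if_neg he, if_pos hb]
        rw [if_neg (show ¬ max cur e < b1 by omega)]
        split_ifs <;> simp
      · simp only [pvAGo, pvARun, if_neg he, if_neg hb]
        rw [ih]
        split_ifs <;> simp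

theorem pv_A_eq (base : Int × Int) (cuts : List (Int × Int)) :
    interval_subtract base cuts =
      pvARun base.2 (PySem.List.sorted2 cuts Prod.fst Prod.snd) base.1 := by
  have h := pvAGo_run base.2 (PySem.List.sorted2 cuts Prod.fst Prod.snd) [] base.1
  simpa [interval_subtract] using h

-- B's complement pass as a pure recursion (identical-shaped recursion used for both the merged
-- table and, via the fusion lemma, the raw clipped list)
def pvGaps (b1 : Int) : List (Int × Int) → Int → List (Int × Int)
  | [], cur => if cur < b1 then [(cur, b1)] else []
  | (s, e) :: r, cur => (if cur < s then [(cur, s)] else []) ++ pvGaps b1 r (max cur e)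

-- B's merge loop as a top-down recursion
def pvMergeRec : Int → Int → List (Int × Int) → List (Int × Int)
  | s, e, [] => [(s, e)]
  | s, e, (s2, e2) :: r => if s2 ≤ e then pvMergeRec s (max e e2) r else (s, e) :: pvMergeRec s2 e2 r

theorem pv_foldl_mergeStep (l2 : List (Int × Int)) :
    ∀ (l1 : List (Int × Int)) (s e : Int),
      l2.foldl pvMergeStep (l1 ++ [(s, e)]) = l1 ++ pvMergeRec s e l2 := by
  induction l2 with
  | nil => intro l1 s e; simp [pvMergeRec]
  | cons c t ih =>
    intro l1 s e
    obtain ⟨s2, e2⟩ := c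
    have hstep : pvMergeStep (l1 ++ [(s, e)]) (s2, e2) =
        if s2 ≤ e then l1 ++ [(s, max e e2)] else (l1 ++ [(s, e)]) ++ [(s2, e2)] := by
      simp [pvMergeStep]
    by_cases h : s2 ≤ e
    · simp only [List.foldl_cons, hstep, if_pos h, pvMergeRec]
      exact ih l1 s (max e e2)
    · simp only [List.foldl_cons, hstep, if_neg h, pvMergeRec]
      rw [ih (l1 ++ [(s, e)]) s2 e2]
      simp
  
theorem pv_foldl_comp (b1 : Int) (l : List (Int × Int)) :
    ∀ (out : List (Int × Int)) (cur : Int),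
      (if (l.foldl (fun (p : List (Int × Int) × Int) c =>
            (if p.2 < c.1 then p.1 ++ [(p.2, c.1)] else p.1, max p.2 c.2)) (out, cur)).2 < b1
        then (l.foldl (fun (p : List (Int × Int) × Int) c =>
            (if p.2 < c.1 then p.1 ++ [(p.2, c.1)] else p.1, max p.2 c.2)) (out, cur)).1 ++
          [((l.foldl (fun (p : List (Int × Int) × Int) c =>
            (if p.2 < c.1 then p.1 ++ [(p.2, c.1)] else p.1, max p.2 c.2)) (out, cur)).2, b1)]
        else (l.foldl (fun (p : List (Int × Int) × Int) c =>
            (if p.2 < c.1 then p.1 ++ [(p.2, c.1)] else p.1, max p.2 c.2)) (out, cur)).1) =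
      out ++ pvGaps b1 l cur := by
  induction l with
  | nil => intro out cur; simp [pvGaps]; split_ifs <;> simp
  | cons c r ih =>
    intro out cur
    obtain ⟨s, e⟩ := c
    simp only [List.foldl_cons, pvGaps]
    rw [ih]
    split_ifs <;> simp

theorem pv_gaps_merge (b1 : Int) (r : List (Int × Int)) :
    ∀ (s e cur : Int),
      pvGaps b1 (pvMergeRec s e r) cur =
        (if cur < s then [(cur, s)] else []) ++ pvGaps b1 r (max cur e) := by
  induction r with
  | nil => intro s e cur; simp [pvMergeRec, pvGaps]
  | cons c t ih =>
    intro s e cur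
    obtain ⟨s2, e2⟩ := c
    by_cases h : s2 ≤ e
    · simp only [pvMergeRec, if_pos h]
      rw [ih s (max e e2) cur]
      simp only [pvGaps]
      have hno : ¬ (max cur e < s2) := by omega
      rw [if_neg hno]
      simp [max_assoc]
    · simp only [pvMergeRec, if_neg h, pvGaps]
      rw [ih s2 e2 (max cur e)]

theorem pv_B_eq (base : Int × Int) (cuts : List (Int × Int)) :
    interval_subtract_alt base cuts =
      pvGaps base.2 (((PySem.List.sorted2 cuts Prod.fst Prod.snd).map
        (fun c => (max c.1 base.1, min c.2 base.2))).filter (fun c => decide (c.1 ≤ c.2))) base.1 := by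
  unfold interval_subtract_alt
  rcases hcl : ((PySem.List.sorted2 cuts Prod.fst Prod.snd).map
      (fun c => (max c.1 base.1, min c.2 base.2))).filter (fun c => decide (c.1 ≤ c.2)) with _ | ⟨c, t⟩
  · simp only [hcl, List.foldl_nil, List.foldl_nil]
    simp only [pvGaps]
    split_ifs <;> simp
  · obtain ⟨cs, ce⟩ := c
    have hcov : ((cs, ce) :: t).foldl pvMergeStep [] = pvMergeRec cs ce t := by
      have h0 : pvMergeStep [] (cs, ce) = [] ++ [(cs, ce)] := by simp [pvMergeStep]
      simp only [List.foldl_cons, h0]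
      simpa using pv_foldl_mergeStep t [] cs ce
    simp only [hcl, hcov]
    rw [pv_foldl_comp base.2 (pvMergeRec cs ce t) [] base.1]
    rw [pv_gaps_merge base.2 t cs ce base.1]
    simp [pvGaps]

-- once cur has passed the base end, a clipped list produces nothing
theorem pv_gaps_done (b1 : Int) (l : List (Int × Int)) :
    ∀ cur : Int, (∀ c ∈ l, c.1 ≤ b1) → b1 ≤ cur → pvGaps b1 l cur = [] := by
  induction l with
  | nil => intro cur _ h; simp only [pvGaps]; rw [if_neg (by omega)]
  | cons c r ih =>
    intro cur hl h
    obtain ⟨s, e⟩ := c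
    have hs : s ≤ b1 := hl (s, e) (by simp)
    simp only [pvGaps]
    rw [if_neg (by omega)]
    simpa using ih (max cur e) (fun c hc => hl c (by simp [hc])) (by omega)

-- a clipped list entirely at or below cur produces nothing once cur is past the base end
theorem pv_gaps_stuck (b1 : Int) (l : List (Int × Int)) :
    ∀ cur : Int, (∀ c ∈ l, c.1 ≤ cur ∧ c.2 ≤ cur) → ¬ cur < b1 → pvGaps b1 l cur = [] := by
  induction l with
  | nil => intro cur _ h; simp only [pvGaps]; rw [if_neg h]
  | cons c r ih =>
    intro cur hl h
    obtain ⟨s, e⟩ := c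
    have hc := hl (s, e) (by simp)
    simp only [pvGaps]
    rw [if_neg (by omega)]
    rw [show max cur e = cur by omega]
    simpa using ih cur (fun c hc => hl c (by simp [hc])) h

-- CORE: on a fst-sorted list of proper cuts, A's sweep equals the gap pass over the clipped list
theorem pv_core (b0 b1 : Int) (l : List (Int × Int)) :
    ∀ cur : Int, l.Pairwise (fun a b => a.1 ≤ b.1) → (∀ c ∈ l, c.1 ≤ c.2 ∨ c.2 ≤ b0 ∨ b1 ≤ c.2) →
      b0 ≤ cur → cur < b1 →
      pvARun b1 l cur =
        pvGaps b1 ((l.map (fun c => (max c.1 b0, min c.2 b1))).filter (fun c => decide (c.1 ≤ c.2))) cur := by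
  induction l with
  | nil => intro cur _ _ _ _; simp [pvARun, pvGaps]
  | cons c r ih =>
    intro cur hpw hwf hb0 hb1
    obtain ⟨s, e⟩ := c
    rcases List.pairwise_cons.mp hpw with ⟨hhead, hpw'⟩
    have hwf' : ∀ c ∈ r, c.1 ≤ c.2 ∨ c.2 ≤ b0 ∨ b1 ≤ c.2 := fun c hc => hwf c (by simp [hc])
    have hse : s ≤ e ∨ e ≤ b0 ∨ b1 ≤ e := hwf (s, e) (by simp)
    have hlt : ∀ c ∈ (r.map (fun c => (max c.1 b0, min c.2 b1))).filter
        (fun c => decide (c.1 ≤ c.2)), c.1 ≤ b1 := by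
      intro c hc
      rcases List.mem_filter.mp hc with ⟨hcm, hcp⟩
      rcases List.mem_map.mp hcm with ⟨d, _, hd⟩
      subst hd
      have := of_decide_eq_true hcp
      simp only at this ⊢
      omega
    simp only [List.map_cons, List.filter_cons]
    by_cases he : e ≤ cur
    · -- A skips; the clipped head (if kept) emits nothing and leaves cur unchanged
      simp only [pvARun, if_pos he]
      by_cases hkeep : max s b0 ≤ min e b1
      · rw [if_pos (by simp only [decide_eq_true_eq]; exact hkeep)]
        simp only [pvGaps]
        rw [if_neg (show ¬ cur < max s b0 by omega)]
        rw [show max cur (min e b1) = cur by omega]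
        exact ih cur hpw' hwf' hb0 hb1
      · rw [if_neg (by simp only [decide_eq_true_eq]; exact hkeep)]
        exact ih cur hpw' hwf' hb0 hb1
    · by_cases hs : s ≤ cur
      · -- active cut overlapping cur: no gap, cur advances to e
        simp only [pvARun, if_neg he]
        rw [if_neg (show ¬ cur < s by omega)]
        rw [if_pos (show decide ((max s b0, min e b1).1 ≤ (max s b0, min e b1).2) = true by
          simp only [decide_eq_true_eq]; show max s b0 ≤ min e b1; omega)]
        simp only [pvGaps]
        rw [if_neg (show ¬ cur < max s b0 by omega)]
        rw [show max cur (min e b1) = min e b1 by omega]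
        by_cases hbe : b1 ≤ e
        · rw [if_pos (show b1 ≤ max cur e by omega)]
          rw [show min e b1 = b1 by omega]
          rw [pv_gaps_done b1 _ b1 hlt le_rfl]
        · rw [if_neg (show ¬ b1 ≤ max cur e by omega)]
          rw [show min e b1 = e by omega, show max cur e = e by omega]
          exact ih e hpw' hwf' (by omega) (by omega)
      · -- gap before this cut
        simp only [pvARun, if_neg he]
        rw [if_pos (show cur < s by omega)]
        by_cases hsb : b1 ≤ s
        · -- the cut starts at or beyond the base end: emit the tail and stop
          rw [show min s b1 = b1 by omega]
          rw [if_pos (show b1 ≤ max cur e by omega)]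
          by_cases hsk : s ≤ b1
          · -- s = b1: the clipped head survives as the zero-length marker (b1, b1)
            rw [if_pos (show decide ((max s b0, min e b1).1 ≤ (max s b0, min e b1).2) = true by
              simp only [decide_eq_true_eq]; show max s b0 ≤ min e b1; omega)]
            simp only [pvGaps]
            rw [if_pos (show cur < max s b0 by omega)]
            rw [show max s b0 = b1 by omega]
            rw [show max cur (min e b1) = b1 by omega]
            rw [pv_gaps_done b1 _ b1 hlt le_rfl]
          · -- s > b1: the clipped head and everything after it is dropped
            rw [if_neg (show ¬ decide ((max s b0, min e b1).1 ≤ (max s b0, min e b1).2) = true by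
              simp only [decide_eq_true_eq]; show ¬ max s b0 ≤ min e b1; omega)]
            have hrest : (r.map (fun c => (max c.1 b0, min c.2 b1))).filter
                (fun c => decide (c.1 ≤ c.2)) = [] := by
              rw [List.filter_eq_nil_iff]
              intro c hc
              rcases List.mem_map.mp hc with ⟨d, hdm, hd⟩
              have := hhead d hdm
              subst hd
              simp only [decide_eq_true_eq]
              omega
            rw [hrest]
            simp only [pvGaps]
            rw [if_pos hb1]
            simp
        · rw [show min s b1 = s by omega]
          rw [if_pos (show decide ((max s b0, min e b1).1 ≤ (max s b0, min e b1).2) = true by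
            simp only [decide_eq_true_eq]; show max s b0 ≤ min e b1; omega)]
          simp only [pvGaps]
          rw [show max s b0 = s by omega]
          rw [if_pos (show cur < s by omega)]
          rw [show max cur (min e b1) = min e b1 by omega]
          by_cases hbe : b1 ≤ e
          · rw [if_pos (show b1 ≤ max cur e by omega)]
            rw [show min e b1 = b1 by omega]
            rw [pv_gaps_done b1 _ b1 hlt le_rfl]
          · rw [if_neg (show ¬ b1 ≤ max cur e by omega)]
            rw [show min e b1 = e by omega, show max cur e = e by omega]
            rw [ih e hpw' hwf' (by omega) (by omega)]

-- on an empty base B's clipping drops everything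
theorem pv_B_degenerate (base : Int × Int) (cuts : List (Int × Int)) (h : base.2 ≤ base.1) :
    interval_subtract_alt base cuts = [] := by
  rw [pv_B_eq]
  refine pv_gaps_stuck base.2 _ base.1 ?_ (by omega)
  intro c hc
  rcases List.mem_filter.mp hc with ⟨hcm, hcp⟩
  rcases List.mem_map.mp hcm with ⟨d, _, hd⟩
  subst hd
  have := of_decide_eq_true hcp
  simp only at this ⊢
  omega

-- degenerate base, no cut reaches above base.1: A's loop skips everything
theorem pv_ARun_allskip (b1 : Int) (l : List (Int × Int)) :
    ∀ cur : Int, (∀ c ∈ l, c.2 ≤ cur) → ¬ cur < b1 → pvARun b1 l cur = [] := by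
  induction l with
  | nil => intro cur _ h; simp [pvARun]; omega
  | cons c r ih =>
    intro cur hl h
    obtain ⟨s, e⟩ := c
    simp only [pvARun, if_pos (hl (s, e) (by simp))]
    exact ih cur (fun c hc => hl c (by simp [hc])) h

-- degenerate base, some active cut starts at or below base.1: A emits nothing and breaks
theorem pv_ARun_lowactive (b0 b1 : Int) (hb : b1 ≤ b0) (l : List (Int × Int)) :
    l.Pairwise (fun a b => a.1 ≤ b.1) → (∃ c ∈ l, b0 < c.2 ∧ c.1 ≤ b0) →
      pvARun b1 l b0 = [] := by
  induction l with
  | nil => rintro _ ⟨c, hc, _⟩; simp at hc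
  | cons c r ih =>
    intro hpw hex
    obtain ⟨s, e⟩ := c
    rcases List.pairwise_cons.mp hpw with ⟨hhead, hpw'⟩
    by_cases he : e ≤ b0
    · simp only [pvARun, if_pos he]
      rcases hex with ⟨c, hc, hc2, hc1⟩
      rcases List.mem_cons.mp hc with hc | hc
      · subst hc; omega
      · exact ih hpw' ⟨c, hc, hc2, hc1⟩
    · have hs : s ≤ b0 := by
        rcases hex with ⟨c, hc, hc2, hc1⟩
        rcases List.mem_cons.mp hc with hc | hc
        · subst hc; exact hc1
        · exact le_trans (hhead c hc) hc1
      simp only [pvARun, if_neg he]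
      rw [if_neg (by omega), if_pos (by omega)]
      simp

-- inside D_: A returns exactly the degenerate leftover [(base.1, base.2)]
theorem pv_ARun_D (b0 b1 : Int) (hb : b1 ≤ b0) (l : List (Int × Int)) :
    (∃ c ∈ l, b0 < c.2) → (∀ c ∈ l, b0 < c.2 → b0 < c.1) →
      pvARun b1 l b0 = [(b0, b1)] := by
  induction l with
  | nil => rintro ⟨c, hc, _⟩; simp at hc
  | cons c r ih =>
    intro hex hall
    obtain ⟨s, e⟩ := c
    by_cases he : e ≤ b0
    · simp only [pvARun, if_pos he]
      refine ih ?_ (fun c hc => hall c (by simp [hc]))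
      rcases hex with ⟨c, hc, hc2⟩
      rcases List.mem_cons.mp hc with hc | hc
      · subst hc; simp at hc2; omega
      · exact ⟨c, hc, hc2⟩
    · have hs : b0 < s := hall (s, e) (by simp) (by omega)
      simp only [pvARun, if_neg he]
      rw [if_pos (by omega), if_pos (by omega)]
      have hmin : min s b1 = b1 := by omega
      rw [hmin]
      simp

-- ===== VERDICT (by name: the statement is the Claim_ definition above) =====
theorem interval_subtract_spec : Claim_unchanged_interval_subtract := by
  intro base cuts hDom hPre
  unfold Spec_interval_subtract
  intro hnD
  obtain ⟨b0, b1⟩ := base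
  by_cases hb : b0 < b1
  · rw [pv_A_eq, pv_B_eq]
    exact pv_core b0 b1 _ b0 (pv_sorted2_pairwise_fst cuts)
      (fun c hc => hPre c ((pv_mem_sorted2 cuts c).mp hc)) le_rfl hb
  · rw [pv_B_degenerate (b0, b1) cuts (by simp; omega)]
    rw [pv_A_eq]
    by_cases hex : ∃ c ∈ cuts, b0 < c.2
    · have hnall : ∃ c ∈ cuts, b0 < c.2 ∧ c.1 ≤ b0 := by
        unfold D_interval_subtract at hnD
        push Not at hnD
        rcases hnD (by simp; omega) hex with ⟨c, hc, hc2, hc1⟩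
        exact ⟨c, hc, hc2, by omega⟩
      refine pv_ARun_lowactive b0 b1 (by omega) _ (pv_sorted2_pairwise_fst cuts) ?_
      rcases hnall with ⟨c, hc, h2, h1⟩
      exact ⟨c, (pv_mem_sorted2 cuts c).mpr hc, h2, h1⟩
    · push Not at hex
      exact pv_ARun_allskip b1 _ b0
        (fun c hc => hex c ((pv_mem_sorted2 cuts c).mp hc)) (by omega)

theorem interval_subtract_changed : Claim_changed_interval_subtract := by
  unfold Claim_changed_interval_subtract; decide

theorem interval_subtract_tight : Claim_exact_interval_subtract := by
  unfold Claim_exact_interval_subtract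
  intro base cuts hDom hPre hD
  obtain ⟨b0, b1⟩ := base
  unfold D_interval_subtract at hD
  obtain ⟨hb, hex, hall⟩ := hD
  simp only at hb hex hall
  rw [pv_A_eq, pv_B_degenerate (b0, b1) cuts (by simpa using hb)]
  rw [pv_ARun_D b0 b1 hb _ ?_ ?_]
  · simp
  · rcases hex with ⟨c, hc, h2⟩
    exact ⟨c, (pv_mem_sorted2 cuts c).mpr hc, h2⟩
  · intro c hc
    exact hall c ((pv_mem_sorted2 cuts c).mp hc)
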